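-- pv_equiv track=rewrite | github.com/m0tl1ya/lib4me | payment.py | compute_cases
-- ===== SOURCE A (Python) =====
-- def compute_cases(n):
--     """compute number of cases of payment by DP"""
--     if n < 1:
--         return 0
--     target = 5 * int(n / 5)
--     if target == 0:
--         return 1
--     a = [1]
--     for i in range(5, target+1, 5):
--         if i >= 25:
--             a.append(a[int((i-25)/5)] + a[int((i-10)/5)] + int(i/5) + 1)
--         elif i >= 10:
--             a.append(a[int((i-10)/5)] + int(i/5) + 1)
--         else:
--             a.append(int(i/5) + 1)
--     return a[-1]
-- ===== SOURCE B (Python) =====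
-- def compute_cases(n):
--     """compute number of cases of payment by DP"""
--     if n < 1:
--         return 0
--     q = n // 5
--     if q == 0:
--         return 1
--     # a_q = b_q - q - 8 where b_k = b_{k-2} + b_{k-5}, b_0..b_4 = 9,11,14,17,21.
--     # Compute x^q mod (x^5 - x^3 - 1) by binary exponentiation (Kitamasa),
--     # then read b_q off as the matching linear combination of b_0..b_4.
--     r = (1, 0, 0, 0, 0)   # polynomial 1
--     b = (0, 1, 0, 0, 0)   # polynomial x
--     e = q
--     while e > 0:
--         if e & 1:
--             r = _mulmod(r, b)
--         b = _mulmod(b, b)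
--         e >>= 1
--     c0, c1, c2, c3, c4 = r
--     bq = 9 * c0 + 11 * c1 + 14 * c2 + 17 * c3 + 21 * c4
--     return bq - q - 8
--
--
-- def _mulmod(c, d):
--     """product of two degree<5 polynomials reduced mod x^5 - x^3 - 1"""
--     c0, c1, c2, c3, c4 = c
--     d0, d1, d2, d3, d4 = d
--     e0 = c0 * d0
--     e1 = c0 * d1 + c1 * d0
--     e2 = c0 * d2 + c1 * d1 + c2 * d0
--     e3 = c0 * d3 + c1 * d2 + c2 * d1 + c3 * d0
--     e4 = c0 * d4 + c1 * d3 + c2 * d2 + c3 * d1 + c4 * d0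
--     e5 = c1 * d4 + c2 * d3 + c3 * d2 + c4 * d1
--     e6 = c2 * d4 + c3 * d3 + c4 * d2
--     e7 = c3 * d4 + c4 * d3
--     e8 = c4 * d4
--     # x^5 = x^3 + 1, x^6 = x^4 + x, x^7 = x^3 + x^2 + 1, x^8 = x^4 + x^3 + x
--     return (e0 + e5 + e7,
--             e1 + e6 + e8,
--             e2 + e7,
--             e3 + e5 + e7 + e8,
--             e4 + e6 + e8)
-- ===== Notes on version B (the rewrite author's own statement) =====
-- stated objective: faster
-- what changed: Replaces the O(n) DP iteration by Kitamasa's method: the shifted sequence b_k=a_k+k+8 satisfies the homogeneous recurrence b_k=b_{k-2}+b_{k-5}, so B computes x^(n//5) mod (x^5-x^3-1) by binary exponentiation and reads the answer off as a linear combination of the five initial values.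
import Mathlib
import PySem

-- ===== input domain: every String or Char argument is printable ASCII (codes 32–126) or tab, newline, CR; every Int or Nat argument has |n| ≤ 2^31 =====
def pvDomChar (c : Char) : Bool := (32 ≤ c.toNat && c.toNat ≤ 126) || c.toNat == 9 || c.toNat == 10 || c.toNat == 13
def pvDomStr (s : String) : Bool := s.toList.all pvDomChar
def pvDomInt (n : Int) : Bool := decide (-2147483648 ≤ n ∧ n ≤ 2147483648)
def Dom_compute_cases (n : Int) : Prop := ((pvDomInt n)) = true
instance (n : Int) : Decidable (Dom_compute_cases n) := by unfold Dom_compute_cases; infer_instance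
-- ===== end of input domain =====

-- B replaces A's O(n) DP iteration by Kitamasa's method: the shifted sequence
-- b_k = a_k + k + 8 satisfies the homogeneous recurrence b_k = b_{k-2} + b_{k-5},
-- so B computes x^(n//5) mod (x^5 - x^3 - 1) by binary exponentiation and reads
-- the answer off the five initial values (objective: faster, asymptotic).

-- ===== PORT A =====
-- int(x/5) on a nonnegative int x is exact truncating division: PySem.Int.truncdiv (exact for |x| < 2^53, true on Dom).
def compute_cases (n : Int) : Int :=
  if n < 1 then 0
  else
    let target : Int := 5 * PySem.Int.truncdiv n 5
    if target = 0 then 1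
    else
      let a := (PySem.List.pyRange 5 (target + 1) 5).foldl (fun a i =>
        if i ≥ 25 then
          a ++ [PySem.List.pyGetD a (PySem.Int.truncdiv (i - 25) 5) 0
                + PySem.List.pyGetD a (PySem.Int.truncdiv (i - 10) 5) 0
                + PySem.Int.truncdiv i 5 + 1]
        else if i ≥ 10 then
          a ++ [PySem.List.pyGetD a (PySem.Int.truncdiv (i - 10) 5) 0
                + PySem.Int.truncdiv i 5 + 1]
        else
          a ++ [PySem.Int.truncdiv i 5 + 1]) [1]
      PySem.List.pyGetD a (-1) 0   -- indices are always in range in A, so the default is never used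

-- ===== PORT B =====
-- product of two degree<5 polynomials reduced mod x^5 - x^3 - 1 (Source B's _mulmod)
def pvMulmod (c d : Int × Int × Int × Int × Int) : Int × Int × Int × Int × Int :=
  let e0 := c.1 * d.1
  let e1 := c.1 * d.2.1 + c.2.1 * d.1
  let e2 := c.1 * d.2.2.1 + c.2.1 * d.2.1 + c.2.2.1 * d.1
  let e3 := c.1 * d.2.2.2.1 + c.2.1 * d.2.2.1 + c.2.2.1 * d.2.1 + c.2.2.2.1 * d.1
  let e4 := c.1 * d.2.2.2.2 + c.2.1 * d.2.2.2.1 + c.2.2.1 * d.2.2.1 + c.2.2.2.1 * d.2.1 + c.2.2.2.2 * d.1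
  let e5 := c.2.1 * d.2.2.2.2 + c.2.2.1 * d.2.2.2.1 + c.2.2.2.1 * d.2.2.1 + c.2.2.2.2 * d.2.1
  let e6 := c.2.2.1 * d.2.2.2.2 + c.2.2.2.1 * d.2.2.2.1 + c.2.2.2.2 * d.2.2.1
  let e7 := c.2.2.2.1 * d.2.2.2.2 + c.2.2.2.2 * d.2.2.2.1
  let e8 := c.2.2.2.2 * d.2.2.2.2
  (e0 + e5 + e7, e1 + e6 + e8, e2 + e7, e3 + e5 + e7 + e8, e4 + e6 + e8)

-- Source B's while loop: binary exponentiation of x modulo x^5 - x^3 - 1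
def pvPowLoop (r b : Int × Int × Int × Int × Int) (e : Nat) : Int × Int × Int × Int × Int :=
  if e = 0 then r
  else pvPowLoop (if e % 2 = 1 then pvMulmod r b else r) (pvMulmod b b) (e / 2)
termination_by e
decreasing_by omega

def compute_cases_alt (n : Int) : Int :=
  if n < 1 then 0
  else
    let q := PySem.Int.floordiv n 5
    if q = 0 then 1
    else
      let r := pvPowLoop (1, 0, 0, 0, 0) (0, 1, 0, 0, 0) q.toNat
      9 * r.1 + 11 * r.2.1 + 14 * r.2.2.1 + 17 * r.2.2.2.1 + 21 * r.2.2.2.2 - q - 8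

-- ===== PRECONDITION & SPEC =====
def Spec_compute_cases (n : Int) (out : Int) : Prop := out = compute_cases_alt n
instance (n : Int) (out : Int) : Decidable (Spec_compute_cases n out) := by unfold Spec_compute_cases; infer_instance

-- ===== CLAIM (what is proved, stated in full; the proofs are below) =====
def Claim_equal_compute_cases : Prop := ∀ (n : Int), Dom_compute_cases n → Spec_compute_cases n (compute_cases n)

-- ===== LEMMAS AND PROOFS =====

-- A's sequence: a_k = a_{k-5} + a_{k-2} + (k+1), terms with negative index read 0, a_0 = 1
def pvSeq : Nat → Int
  | 0 => 1
  | (k+1) => (if 4 ≤ k then pvSeq (k - 4) else 0) + (if 1 ≤ k then pvSeq (k - 1) else 0) + ((k : Int) + 2)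
decreasing_by all_goals omega

theorem tdiv5_nat (j : Nat) : PySem.Int.truncdiv ((j : Int) * 5) 5 = (j : Int) := by
  unfold PySem.Int.truncdiv
  rw [Int.tdiv_eq_ediv_of_nonneg (by positivity)]
  omega

theorem A_loop (m : Nat) :
    (List.range m).foldl (fun a (k : Nat) =>
        if (5 : Int) + 5 * (k : Int) ≥ 25 then
          a ++ [PySem.List.pyGetD a (PySem.Int.truncdiv (5 + 5 * (k : Int) - 25) 5) 0
                + PySem.List.pyGetD a (PySem.Int.truncdiv (5 + 5 * (k : Int) - 10) 5) 0
                + PySem.Int.truncdiv (5 + 5 * (k : Int)) 5 + 1]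
        else if (5 : Int) + 5 * (k : Int) ≥ 10 then
          a ++ [PySem.List.pyGetD a (PySem.Int.truncdiv (5 + 5 * (k : Int) - 10) 5) 0
                + PySem.Int.truncdiv (5 + 5 * (k : Int)) 5 + 1]
        else
          a ++ [PySem.Int.truncdiv (5 + 5 * (k : Int)) 5 + 1]) [1]
    = (List.range (m + 1)).map pvSeq := by
  induction m with
  | zero => simp [pvSeq]
  | succ m ih =>
    rw [List.range_succ, List.foldl_append, ih]
    simp only [List.foldl_cons, List.foldl_nil]
    have hget : ∀ j : Nat, j < m + 1 →
        PySem.List.pyGetD ((List.range (m+1)).map pvSeq) (j : Int) 0 = pvSeq j := by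
      intro j hj
      rw [PySem.List.pyGetD_natCast]
      simp [List.getD_eq_getElem?_getD, hj]
    have hrhs : (List.range (m+1+1)).map pvSeq
        = (List.range (m+1)).map pvSeq ++ [pvSeq (m+1)] := by
      rw [List.range_succ, List.map_append]
      simp
    rw [hrhs]
    have e5 : (5 : Int) + 5 * (m : Int) = ((m + 1 : Nat) : Int) * 5 := by omega
    by_cases h4 : 4 ≤ m
    · rw [if_pos (by omega : (5 : Int) + 5 * (m : Int) ≥ 25)]
      have e25 : (5 : Int) + 5 * (m : Int) - 25 = ((m - 4 : Nat) : Int) * 5 := by omega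
      have e10 : (5 : Int) + 5 * (m : Int) - 10 = ((m - 1 : Nat) : Int) * 5 := by omega
      rw [e25, e10, e5, tdiv5_nat, tdiv5_nat, tdiv5_nat,
        hget _ (by omega), hget _ (by omega)]
      congr 1
      rw [pvSeq]
      rw [if_pos h4, if_pos (by omega : 1 ≤ m)]
      push_cast
      congr 1
      ring
    · by_cases h1 : 1 ≤ m
      · rw [if_neg (by omega : ¬ (5 : Int) + 5 * (m : Int) ≥ 25),
          if_pos (by omega : (5 : Int) + 5 * (m : Int) ≥ 10)]
        have e10 : (5 : Int) + 5 * (m : Int) - 10 = ((m - 1 : Nat) : Int) * 5 := by omega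
        rw [e10, e5, tdiv5_nat, tdiv5_nat, hget _ (by omega)]
        congr 1
        rw [pvSeq]
        rw [if_neg h4, if_pos h1]
        push_cast
        congr 1
        ring
      · rw [if_neg (by omega : ¬ (5 : Int) + 5 * (m : Int) ≥ 25),
          if_neg (by omega : ¬ (5 : Int) + 5 * (m : Int) ≥ 10)]
        rw [e5, tdiv5_nat]
        congr 1
        rw [pvSeq]
        rw [if_neg h4, if_neg h1]
        push_cast
        congr 1
        ring

-- the shifted sequence b_k = a_k + k + 8: homogeneous recurrence b_{k+5} = b_{k+3} + b_k
def pvB : Nat → Int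
  | 0 => 9
  | 1 => 11
  | 2 => 14
  | 3 => 17
  | 4 => 21
  | (k+5) => pvB (k+3) + pvB k

-- evaluation of a polynomial (degree < 5) against the sequence pvB shifted by m
def pvL (c : Int × Int × Int × Int × Int) (m : Nat) : Int :=
  c.1 * pvB m + c.2.1 * pvB (m+1) + c.2.2.1 * pvB (m+2) + c.2.2.2.1 * pvB (m+3) + c.2.2.2.2 * pvB (m+4)

theorem pvB_rec (m : Nat) : pvB (m+5) = pvB (m+3) + pvB m := by rw [pvB]

theorem pvMulmod_rep (c d : Int × Int × Int × Int × Int) (k j : Nat)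
    (hc : ∀ m, pvL c m = pvB (m+k)) (hd : ∀ m, pvL d m = pvB (m+j)) :
    ∀ m, pvL (pvMulmod c d) m = pvB (m + (k + j)) := by
  intro m
  obtain ⟨c0, c1, c2, c3, c4⟩ := c
  obtain ⟨d0, d1, d2, d3, d4⟩ := d
  have q5 : pvB (m+5) = pvB (m+3) + pvB m := pvB_rec m
  have q6 : pvB (m+6) = pvB (m+4) + pvB (m+1) := pvB_rec (m+1)
  have q7 : pvB (m+7) = pvB (m+3) + pvB m + pvB (m+2) := by
    have h := pvB_rec (m+2)
    simp only [Nat.add_assoc, Nat.reduceAdd] at h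
    omega
  have q8 : pvB (m+8) = pvB (m+4) + pvB (m+1) + pvB (m+3) := by
    have h := pvB_rec (m+3)
    simp only [Nat.add_assoc, Nat.reduceAdd] at h
    omega
  have hc0 := hc m
  have hc1 := hc (m+1)
  have hc2 := hc (m+2)
  have hc3 := hc (m+3)
  have hc4 := hc (m+4)
  have hdm := hd (m+k)
  have n1 : 1 + k = k + 1 := Nat.add_comm 1 k
  have n2 : 2 + k = k + 2 := Nat.add_comm 2 k
  have n3 : 3 + k = k + 3 := Nat.add_comm 3 k
  have n4 : 4 + k = k + 4 := Nat.add_comm 4 k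
  simp only [pvL, pvMulmod, Nat.add_assoc, Nat.reduceAdd, n1, n2, n3, n4] at hc0 hc1 hc2 hc3 hc4 hdm ⊢
  linear_combination hdm + d0 * hc0 + d1 * hc1 + d2 * hc2 + d3 * hc3 + d4 * hc4
    - (c1 * d4 + c2 * d3 + c3 * d2 + c4 * d1) * q5
    - (c2 * d4 + c3 * d3 + c4 * d2) * q6
    - (c3 * d4 + c4 * d3) * q7
    - c4 * d4 * q8

theorem pvPowLoop_rep (e : Nat) : ∀ (r b : Int × Int × Int × Int × Int) (k j : Nat),
    (∀ m, pvL r m = pvB (m+k)) → (∀ m, pvL b m = pvB (m+j)) →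
    ∀ m, pvL (pvPowLoop r b e) m = pvB (m + (k + j * e)) := by
  induction e using Nat.strong_induction_on with
  | _ e ih =>
    intro r b k j hr hb m
    by_cases he : e = 0
    · subst he
      rw [pvPowLoop]
      simpa using hr m
    · rw [pvPowLoop, if_neg he]
      by_cases hpar : e % 2 = 1
      · rw [if_pos hpar]
        have h := ih (e / 2) (by omega) (pvMulmod r b) (pvMulmod b b) (k + j) (j + j)
          (pvMulmod_rep r b k j hr hb) (pvMulmod_rep b b j j hb hb) m
        rw [h]
        obtain ⟨t, ht⟩ : ∃ t, e = 2 * t + 1 := ⟨e / 2, by omega⟩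
        have h2 : e / 2 = t := by omega
        rw [h2, ht]
        ring_nf
      · rw [if_neg hpar]
        have h := ih (e / 2) (by omega) r (pvMulmod b b) k (j + j)
          hr (pvMulmod_rep b b j j hb hb) m
        rw [h]
        obtain ⟨t, ht⟩ : ∃ t, e = 2 * t := ⟨e / 2, by omega⟩
        have h2 : e / 2 = t := by omega
        rw [h2, ht]
        ring_nf

theorem pvB_eq_seq (k : Nat) : pvB k = pvSeq k + (k : Int) + 8 := by
  induction k using Nat.strong_induction_on with
  | _ k ih =>
    match k with
    | 0 => norm_num [pvB, pvSeq]
    | 1 => norm_num [pvB, pvSeq]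
    | 2 => norm_num [pvB, pvSeq]
    | 3 => norm_num [pvB, pvSeq]
    | 4 => norm_num [pvB, pvSeq]
    | (k+5) =>
      rw [pvB_rec, ih (k+3) (by omega), ih k (by omega)]
      have h : pvSeq (k+5) = pvSeq (k+3) + pvSeq k + ((k : Int) + 6) := by
        rw [show k + 5 = (k+4) + 1 from rfl, pvSeq]
        rw [if_pos (by omega : 4 ≤ k + 4), if_pos (by omega : 1 ≤ k + 4)]
        have e1 : k + 4 - 4 = k := by omega
        have e2 : k + 4 - 1 = k + 3 := by omega
        rw [e1, e2]
        push_cast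
        ring
      rw [h]
      push_cast
      ring

-- ===== VERDICT (by name: the statement is the Claim_ definition above) =====
theorem compute_cases_spec : Claim_equal_compute_cases := by
  intro n _
  unfold Spec_compute_cases compute_cases compute_cases_alt
  by_cases hn : n < 1
  · simp [hn]
  · simp only [if_neg hn]
    have htd : PySem.Int.truncdiv n 5 = PySem.Int.floordiv n 5 := by
      unfold PySem.Int.truncdiv
      rw [Int.tdiv_eq_ediv_of_nonneg (by omega), PySem.Int.floordiv_eq_ediv_of_pos (by omega)]
    rw [htd]
    have hq0 : 0 ≤ PySem.Int.floordiv n 5 := by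
      rw [PySem.Int.floordiv_eq_ediv_of_pos (by omega)]
      exact Int.ediv_nonneg (by omega) (by omega)
    by_cases hz : PySem.Int.floordiv n 5 = 0
    · rw [hz]
      norm_num
    · obtain ⟨m, hm⟩ : ∃ m : Nat, PySem.Int.floordiv n 5 = ((m + 1 : Nat) : Int) := by
        refine ⟨(PySem.Int.floordiv n 5 - 1).toNat, by omega⟩
      rw [hm]
      rw [if_neg (by push_cast; omega), if_neg (by omega : ¬ ((m + 1 : Nat) : Int) = 0)]
      -- A's side evaluates to pvSeq (m+1)
      have hE : ((5 * ((m + 1 : Nat) : Int) + 1 - 5 + 5 - 1) / 5).toNat = m + 1 := by omega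
      have hrangeA : PySem.List.pyRange 5 (5 * ((m + 1 : Nat) : Int) + 1) 5
          = (List.range (m + 1)).map (fun (k : Nat) => (5 : Int) + 5 * (k : Int)) := by
        rw [PySem.List.pyRange_of_pos _ _ (by norm_num),
          if_pos (by push_cast; omega : (5 : Int) < 5 * ((m + 1 : Nat) : Int) + 1), hE]
      rw [hrangeA, List.foldl_map, A_loop (m + 1)]
      rw [List.range_succ, List.map_append]
      simp only [List.map_cons, List.map_nil]
      rw [PySem.List.pyGetD_neg_one_append_singleton]
      -- B's side evaluates to pvB (m+1) - (m+1) - 8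
      have htn : (((m + 1 : Nat) : Int)).toNat = m + 1 := by omega
      rw [htn]
      have hone : ∀ m', pvL (1, 0, 0, 0, 0) m' = pvB (m' + 0) := by
        intro m'; simp [pvL]
      have hx : ∀ m', pvL (0, 1, 0, 0, 0) m' = pvB (m' + 1) := by
        intro m'; simp [pvL]
      have hpow := pvPowLoop_rep (m + 1) (1, 0, 0, 0, 0) (0, 1, 0, 0, 0) 0 1 hone hx 0
      simp only [pvL] at hpow
      simp only [pvB] at hpow
      have hgoal := pvB_eq_seq (m + 1)
      -- combine
      push_cast at hgoal ⊢
      simp only [show (0:Nat) + (0 + 1 * (m+1)) = m + 1 from by omega] at hpow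
      omega
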